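-- pv_equiv track=rewrite | github.com/zofialuther/CS8395-08-Paper1-updated | data/translated-code/pseudo-to-python/prolog/Egyptian-division.py | powers2_multiples
-- ===== SOURCE A (Python) =====
-- def powers2_multiples(Dividend, Powers, Multiples):
--     if 2 * Multiples[-1] > Dividend:
--         return Powers, Multiples
--     else:
--         Power2 = 2 * Powers[-1]
--         Multiple2 = 2 * Multiples[-1]
--         Powers.append(Power2)
--         Multiples.append(Multiple2)
--         return powers2_multiples(Dividend, Powers, Multiples)
-- ===== SOURCE B (Python) =====
-- def powers2_multiples(Dividend, Powers, Multiples):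
--     p, m = Powers[-1], Multiples[-1]
--     if m > 0:
--         q = Dividend // m
--         k = q.bit_length() - 1 if q >= 2 else 0
--     else:
--         k = 0
--     Powers.extend(p * 2 ** i for i in range(1, k + 1))
--     Multiples.extend(m * 2 ** i for i in range(1, k + 1))
--     return Powers, Multiples
-- ===== Notes on version B (the rewrite author's own statement) =====
-- stated objective: alternative
-- what changed: Replaces the append-and-recurse loop by a closed-form count: k = bit_length(Dividend//last_multiple)-1 doublings are computed once and both extensions are built as geometric comprehensions p*2**i, m*2**i.
-- outside the precondition, e.g. on powers2_multiples(0, [], [1]): A returns ([], [1]), B raises IndexError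
import Mathlib
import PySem

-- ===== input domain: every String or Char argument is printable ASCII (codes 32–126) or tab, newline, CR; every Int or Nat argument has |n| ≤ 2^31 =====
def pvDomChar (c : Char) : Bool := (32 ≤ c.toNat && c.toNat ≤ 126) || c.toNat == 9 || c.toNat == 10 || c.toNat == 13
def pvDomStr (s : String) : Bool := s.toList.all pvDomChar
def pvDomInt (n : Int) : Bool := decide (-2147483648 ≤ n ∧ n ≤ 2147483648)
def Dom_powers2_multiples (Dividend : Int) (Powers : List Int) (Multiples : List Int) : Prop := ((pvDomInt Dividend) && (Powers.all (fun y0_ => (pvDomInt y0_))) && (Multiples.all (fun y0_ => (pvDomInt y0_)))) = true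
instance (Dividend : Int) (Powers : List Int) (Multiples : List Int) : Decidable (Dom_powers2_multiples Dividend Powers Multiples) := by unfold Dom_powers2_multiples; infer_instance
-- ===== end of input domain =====

-- B replaces A's append-and-recurse loop by a closed-form doubling count obtained from
-- bit_length of Dividend // Multiples[-1], then builds both extensions as geometric maps
-- (objective: alternative). Both A and B extend the passed-in lists in place in Python;
-- the equivalence proved here is about the returned pair of lists.

-- ===== PORT A =====
-- the fuel argument only makes A's unbounded recursion total in Lean; inside
-- Pre_ it is proved never to run out (Dividend.toNat + 2 suffices)
def powers2_multiplesRec (Dividend : Int) : Nat → List Int → List Int → List Int × List Int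
  | 0, Powers, Multiples => (Powers, Multiples)
  | fuel + 1, Powers, Multiples =>
    match PySem.List.pyGet? Multiples (-1) with
    | none => (Powers, Multiples)  -- IndexError in Python; excluded by Pre_
    | some ml =>
      if 2 * ml > Dividend then (Powers, Multiples)
      else
        match PySem.List.pyGet? Powers (-1) with
        | none => (Powers, Multiples)  -- IndexError in Python; excluded by Pre_
        | some pl =>
          powers2_multiplesRec Dividend fuel (Powers ++ [2 * pl]) (Multiples ++ [2 * ml])

def powers2_multiples (Dividend : Int) (Powers : List Int) (Multiples : List Int) : List Int × List Int :=
  powers2_multiplesRec Dividend (Dividend.toNat + 2) Powers Multiples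

-- ===== PORT B =====
def powers2_multiples_alt (Dividend : Int) (Powers : List Int) (Multiples : List Int) : List Int × List Int :=
  match PySem.List.pyGet? Powers (-1), PySem.List.pyGet? Multiples (-1) with
  | some p, some m =>
    let k : Nat :=
      if 0 < m then
        let q := PySem.Int.floordiv Dividend m
        if 2 ≤ q then PySem.Int.bitLength q - 1 else 0
      else 0
    (Powers ++ (List.range' 1 k).map (fun i => p * 2 ^ i),
     Multiples ++ (List.range' 1 k).map (fun i => m * 2 ^ i))
  | _, _ => (Powers, Multiples)  -- IndexError in Python; excluded by Pre_

-- ===== PRECONDITION & SPEC =====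
-- Pre_ excludes (a) an empty Powers or Multiples: A raises IndexError there, except that with
-- Powers = [] and 2*Multiples[-1] > Dividend A happens to return without reading Powers[-1]
-- while B raises IndexError; and (b) a non-positive last multiple with 2*Multiples[-1] ≤ Dividend,
-- where A's doubling never exceeds Dividend and A exceeds the recursion limit (RecursionError).
def Pre_powers2_multiples (Dividend : Int) (Powers : List Int) (Multiples : List Int) : Prop :=
  Powers ≠ [] ∧ Multiples ≠ [] ∧
    (0 < Multiples.getLastD 0 ∨ Dividend < 2 * Multiples.getLastD 0)
instance (Dividend : Int) (Powers : List Int) (Multiples : List Int) : Decidable (Pre_powers2_multiples Dividend Powers Multiples) := by unfold Pre_powers2_multiples; infer_instance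

def pvWitness_powers2_multiples : Int × List Int × List Int := (10, [1], [1])

def Spec_powers2_multiples (Dividend : Int) (Powers : List Int) (Multiples : List Int) (out : List Int × List Int) : Prop := out = powers2_multiples_alt Dividend Powers Multiples
instance (Dividend : Int) (Powers : List Int) (Multiples : List Int) (out : List Int × List Int) : Decidable (Spec_powers2_multiples Dividend Powers Multiples out) := by unfold Spec_powers2_multiples; infer_instance

-- ===== CLAIM (what is proved, stated in full; the proofs are below) =====
def Claim_equal_powers2_multiples : Prop := ∀ (Dividend : Int) (Powers : List Int) (Multiples : List Int), Dom_powers2_multiples Dividend Powers Multiples → Pre_powers2_multiples Dividend Powers Multiples → Spec_powers2_multiples Dividend Powers Multiples (powers2_multiples Dividend Powers Multiples)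

-- ===== LEMMAS AND PROOFS =====

-- the number of doublings, as B computes it
def pvN (D m : Int) : Nat :=
  if 2 ≤ PySem.Int.floordiv D m then PySem.Int.bitLength (PySem.Int.floordiv D m) - 1 else 0

lemma pv_bitLength_ge_two {q : Int} (hq : 2 ≤ q) : 2 ≤ PySem.Int.bitLength q := by
  by_contra h
  have h1 : q.natAbs < 2 ^ PySem.Int.bitLength q := PySem.Int.lt_two_pow_bitLength q
  have h2 : 2 ^ PySem.Int.bitLength q ≤ 2 ^ 1 := Nat.pow_le_pow_right (by omega) (by omega)
  omega

lemma pvN_eq_zero_lt {D m : Int} (hm : 0 < m) (h : pvN D m = 0) : D < 2 * m := by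
  by_contra hle
  have hq : 2 ≤ PySem.Int.floordiv D m :=
    (PySem.Int.le_floordiv_iff_mul_le hm).2 (by omega)
  have := pv_bitLength_ge_two hq
  unfold pvN at h
  rw [if_pos hq] at h
  omega

lemma pvN_succ {D m : Int} {k : Nat} (hm : 0 < m) (hq : 2 ≤ PySem.Int.floordiv D m)
    (h : pvN D m = k + 1) : pvN D (2 * m) = k := by
  have hfd : PySem.Int.floordiv D m = D / m := PySem.Int.floordiv_eq_ediv_of_pos hm
  have hfd2 : PySem.Int.floordiv D (2 * m) = D / (2 * m) :=
    PySem.Int.floordiv_eq_ediv_of_pos (by omega)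
  have hsplit : D / (2 * m) = (D / m) / 2 := by
    rw [mul_comm]
    exact (Int.ediv_ediv_of_nonneg (le_of_lt hm)).symm
  set q := D / m with hqdef
  have hq' : 2 ≤ q := hfd ▸ hq
  have hhalf : PySem.Int.floordiv q 2 = q / 2 := PySem.Int.floordiv_eq_ediv_of_pos (by omega)
  have hbl : PySem.Int.bitLength q = PySem.Int.bitLength (q / 2) + 1 := by
    have := PySem.Int.bitLength_of_pos (n := q) (by omega)
    rwa [hhalf] at this
  have hk : PySem.Int.bitLength q = k + 2 := by
    unfold pvN at h
    rw [hfd, if_pos hq'] at h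
    have := pv_bitLength_ge_two hq'
    omega
  have hblhalf : PySem.Int.bitLength (q / 2) = k + 1 := by omega
  have hone : 1 ≤ q / 2 := by
    have : (1 : Int) * 2 ≤ q := by omega
    exact (Int.le_ediv_iff_mul_le (by omega)).2 this
  unfold pvN
  rw [hfd2, hsplit]
  by_cases h2 : (2 : Int) ≤ q / 2
  · rw [if_pos h2]; omega
  · rw [if_neg h2]
    have he : q / 2 = 1 := by omega
    rw [he] at hblhalf
    have : PySem.Int.bitLength 1 = 1 := by decide
    omega

lemma pv_shift : ∀ (k s : Nat) (a : Int),
    (List.range' s k).map (fun i => 2 * a * 2 ^ i) = (List.range' (s + 1) k).map (fun i => a * 2 ^ i) := by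
  intro k
  induction k with
  | zero => intro s a; simp
  | succ n ih =>
    intro s a
    rw [List.range'_succ, List.range'_succ]
    simp only [List.map_cons, ih]
    congr 1
    ring

lemma pv_last_append (xs : List Int) (a : Int) :
    PySem.List.pyGet? (xs ++ [a]) (-1) = some a :=
  PySem.List.pyGet?_neg_one_append_singleton xs a

lemma pvMain : ∀ (k fuel : Nat) (D : Int) (P M : List Int) (p m : Int),
    PySem.List.pyGet? P (-1) = some p → PySem.List.pyGet? M (-1) = some m → 0 < m →
    pvN D m = k → k < fuel →
    powers2_multiplesRec D fuel P M =
      (P ++ (List.range' 1 k).map (fun i => p * 2 ^ i),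
       M ++ (List.range' 1 k).map (fun i => m * 2 ^ i)) := by
  intro k
  induction k with
  | zero =>
    intro fuel D P M p m hp hm hmpos hN hfuel
    obtain ⟨f, rfl⟩ : ∃ f, fuel = f + 1 := ⟨fuel - 1, by omega⟩
    have hlt : D < 2 * m := pvN_eq_zero_lt hmpos hN
    simp only [powers2_multiplesRec, hm]
    rw [if_pos (by omega)]
    simp
  | succ n ih =>
    intro fuel D P M p m hp hm hmpos hN hfuel
    obtain ⟨f, rfl⟩ : ∃ f, fuel = f + 1 := ⟨fuel - 1, by omega⟩
    have hq : 2 ≤ PySem.Int.floordiv D m := by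
      by_contra hq
      unfold pvN at hN; rw [if_neg hq] at hN; omega
    have hle : 2 * m ≤ D := (PySem.Int.le_floordiv_iff_mul_le hmpos).1 hq
    simp only [powers2_multiplesRec, hm, hp]
    rw [if_neg (by omega)]
    rw [ih f D (P ++ [2 * p]) (M ++ [2 * m]) (2 * p) (2 * m)
      (pv_last_append P (2 * p)) (pv_last_append M (2 * m)) (by omega)
      (pvN_succ hmpos hq hN) (by omega)]
    rw [List.range'_succ]
    simp only [List.map_cons, List.append_assoc, pv_shift]
    norm_num
    exact ⟨by ring, by ring⟩

lemma pv_fuel {D m : Int} (hm : 0 < m) : pvN D m < D.toNat + 2 := by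
  unfold pvN
  by_cases hq : 2 ≤ PySem.Int.floordiv D m
  · rw [if_pos hq]
    have hfd : PySem.Int.floordiv D m = D / m := PySem.Int.floordiv_eq_ediv_of_pos hm
    have hle : 2 * m ≤ D := (PySem.Int.le_floordiv_iff_mul_le hm).1 hq
    have hqD : PySem.Int.floordiv D m ≤ D := by
      rw [hfd]
      exact Int.ediv_le_self _ (by omega)
    set q := PySem.Int.floordiv D m with hqdef
    have h1 : 2 ^ (PySem.Int.bitLength q - 1) ≤ q.natAbs :=
      PySem.Int.two_pow_bitLength_le q (by omega)
    have h2 : PySem.Int.bitLength q - 1 < 2 ^ (PySem.Int.bitLength q - 1) :=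
      Nat.lt_two_pow_self
    have h3 : q.natAbs ≤ D.toNat := by omega
    omega
  · rw [if_neg hq]; omega

lemma pv_getLast_some {M : List Int} (h : M ≠ []) :
    PySem.List.pyGet? M (-1) = some (M.getLastD 0) := by
  rw [PySem.List.pyGet?_neg_one, List.getLastD_eq_getLast?]
  cases hM : M.getLast? with
  | none => exact absurd (List.getLast?_eq_none_iff.1 hM) h
  | some a => rfl

-- ===== VERDICT (by name: the statement is the Claim_ definition above) =====
theorem powers2_multiples_spec : Claim_equal_powers2_multiples := by
  intro D P M _ hpre
  obtain ⟨hP, hM, hdisj⟩ := hpre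
  have hp := pv_getLast_some hP
  have hm := pv_getLast_some hM
  set p := P.getLastD 0
  set m := M.getLastD 0
  unfold Spec_powers2_multiples powers2_multiples powers2_multiples_alt
  rw [hp, hm]
  by_cases hmpos : 0 < m
  · rw [pvMain (pvN D m) (D.toNat + 2) D P M p m hp hm hmpos rfl (pv_fuel hmpos)]
    simp only [if_pos hmpos]
    rfl
  · have hlt : D < 2 * m := by
      rcases hdisj with h | h
      · exact absurd h hmpos
      · exact h
    simp only [powers2_multiplesRec, hm]
    rw [if_pos (by omega), if_neg hmpos]
    simp
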